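-- pv_equiv track=rewrite | github.com/ASSERT-KTH/Mokav | experiments/c4b/AAT/iteration-1-sample-100-temp-1/generated_tests/2766/1673/temp_acc_qb.py | patched_func
-- ===== SOURCE A (Python) =====
-- def patched_func(*args):
-- 	global_list = []
--
-- 	N = str(args[0].split()[0])
-- 	P = N[(- 1)::(- 1)]
-- 	k = 0
-- 	for i in range(0, len(N)):
-- 	    if (N[i] != P[i]):
-- 	        k += 1
-- 	if (k == 0):
-- 	    if ((len(N) % 2) == 0):
-- 	        global_list.append('NO')
-- 	    else:
-- 	        global_list.append('YES')
-- 	elif ((k - 1) == 1):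
-- 	    global_list.append('YES')
-- 	else:
-- 	    global_list.append('NO')
-- 	return global_list
-- ===== SOURCE B (Python) =====
-- def patched_func(*args):
--     N = str(args[0].split()[0])
--     m = 0
--     i = 0
--     j = len(N) - 1
--     while i < j:
--         if N[i] != N[j]:
--             m += 1
--         i += 1
--         j -= 1
--     if m == 0:
--         return ['YES' if len(N) % 2 == 1 else 'NO']
--     if m == 1:
--         return ['YES']
--     return ['NO']
-- ===== Notes on version B (the rewrite author's own statement) =====
-- stated objective: alternative
-- what changed: B drops the reversed copy and the full-length mismatch loop: it walks two pointers inward from the token's ends, counting each mismatching outer pair once (half the comparisons, no copy), and classifies on that pair count (m==0 -> length parity, m==1 -> YES, else NO) instead of A's doubled count k against the reversed string.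
import Mathlib
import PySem

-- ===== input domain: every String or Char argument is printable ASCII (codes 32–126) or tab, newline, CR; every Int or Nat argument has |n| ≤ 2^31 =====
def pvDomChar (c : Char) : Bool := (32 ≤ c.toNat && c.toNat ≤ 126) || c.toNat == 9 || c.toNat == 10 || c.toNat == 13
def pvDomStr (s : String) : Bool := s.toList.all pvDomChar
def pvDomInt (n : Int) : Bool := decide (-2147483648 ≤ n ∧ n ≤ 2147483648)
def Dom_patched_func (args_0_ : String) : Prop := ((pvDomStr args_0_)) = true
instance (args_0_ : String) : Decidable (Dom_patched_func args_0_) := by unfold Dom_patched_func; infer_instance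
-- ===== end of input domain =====

-- B walks two pointers inward from the token's ends, counting each mismatching outer pair once,
-- instead of A's full-length loop against a reversed copy (return value only; no mutation).

-- ===== PORT A =====
def patched_func (args_0_ : String) : List String :=
  match PySem.List.pyGet? (PySem.Chars.split₀ args_0_.toList) 0 with
  | none => []          -- args[0].split()[0] raises IndexError here: excluded by Pre_
  | some N =>
    match PySem.List.slice? N none none (-1) with   -- P = N[-1::-1] (step ≠ 0, always some)
    | none => []
    | some P =>
      let k := (PySem.List.pyRange 0 (N.length : Int) 1).foldl
        (fun k i => if PySem.List.pyGet? N i ≠ PySem.List.pyGet? P i then k + 1 else k) (0 : Int)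
      if k = 0 then
        (if PySem.Int.mod (N.length : Int) 2 = 0 then ["NO"] else ["YES"])
      else if k - 1 = 1 then ["YES"] else ["NO"]

-- ===== PORT B =====
-- Source B's 'while i < j' two-pointer loop, as tail recursion on the shrinking window
def misTP (N : List Char) (i j m : Int) : Int :=
  if i < j then
    misTP N (i + 1) (j - 1) (if PySem.List.pyGet? N i ≠ PySem.List.pyGet? N j then m + 1 else m)
  else m
termination_by (j - i).toNat
decreasing_by omega

def patched_func_alt (args_0_ : String) : List String :=
  match PySem.List.pyGet? (PySem.Chars.split₀ args_0_.toList) 0 with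
  | none => []          -- same IndexError: excluded by Pre_
  | some N =>
    let m := misTP N 0 ((N.length : Int) - 1) 0
    if m = 0 then
      (if PySem.Int.mod (N.length : Int) 2 = 1 then ["YES"] else ["NO"])
    else if m = 1 then ["YES"] else ["NO"]

-- ===== PRECONDITION & SPEC =====
-- Both programs raise IndexError when args[0] has no whitespace-separated token (empty or all-whitespace input).
def Pre_patched_func (args_0_ : String) : Prop := PySem.Chars.split₀ args_0_.toList ≠ []
instance (args_0_ : String) : Decidable (Pre_patched_func args_0_) := by unfold Pre_patched_func; infer_instance
def pvWitness_patched_func : String := "aba"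

def Spec_patched_func (args_0_ : String) (out : List String) : Prop := out = patched_func_alt args_0_
instance (args_0_ : String) (out : List String) : Decidable (Spec_patched_func args_0_ out) := by unfold Spec_patched_func; infer_instance

-- ===== CLAIM (what is proved, stated in full; the proofs are below) =====
def Claim_equal_patched_func : Prop := ∀ (args_0_ : String), Dom_patched_func args_0_ → Pre_patched_func args_0_ → Spec_patched_func args_0_ (patched_func args_0_)

-- ===== LEMMAS AND PROOFS =====

-- proof-side reference count: mismatching outer pairs by structural peeling of both ends
def misCount : List Char → Nat
  | [] => 0
  | a :: rest =>
      (if a ≠ rest.getLastD a then 1 else 0) + misCount rest.dropLast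
termination_by cs => cs.length
decreasing_by simp [List.length_dropLast]

-- index-wise mismatch count equals the pair-wise count over the zip
theorem countP_range_zip {α : Type} [DecidableEq α] (x y : List α) (h : x.length = y.length) :
    (List.range x.length).countP (fun i => decide (x[i]? ≠ y[i]?))
      = (x.zip y).countP (fun p => decide (p.1 ≠ p.2)) := by
  induction x generalizing y with
  | nil => simp
  | cons a x' ih =>
    cases y with
    | nil => simp at h
    | cons b y' =>
      simp only [List.length_cons, List.range_succ_eq_map, List.countP_cons, List.countP_map,
        Function.comp_def, List.zip_cons_cons, List.getElem?_cons_succ, List.getElem?_cons_zero]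
      have h' : x'.length = y'.length := by simpa using h
      congr 1
      · exact ih y' h'
      · simp [ne_eq, Option.some.injEq]

-- each outer pair (i, n-1-i) is seen twice in the zip against the reverse, once in misCount
theorem zip_reverse_countP (N : List Char) :
    (N.zip N.reverse).countP (fun p => decide (p.1 ≠ p.2)) = 2 * misCount N := by
  induction N using misCount.induct with
  | case1 => simp [misCount]
  | case2 a rest ih =>
    rcases eq_or_ne rest [] with rfl | hne
    · simp [misCount]
    · obtain ⟨M, b, rfl⟩ : ∃ M b, rest = M ++ [b] :=
        ⟨rest.dropLast, rest.getLast hne, (rest.dropLast_append_getLast hne).symm⟩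
      have hr : (a :: (M ++ [b])).reverse = b :: (M.reverse ++ [a]) := by simp
      have hz : ((a :: (M ++ [b])).zip (a :: (M ++ [b])).reverse)
          = (a, b) :: (M.zip M.reverse ++ [(b, a)]) := by
        rw [hr, List.zip_cons_cons, List.zip_append (by simp)]; rfl
      rw [hz]
      have hM : (M ++ [b]).dropLast = M := by simp
      rw [hM] at ih
      simp only [List.countP_cons, List.countP_append, List.countP_nil, ih]
      have : misCount (a :: (M ++ [b])) = (if a ≠ b then 1 else 0) + misCount M := by
        rw [misCount]; simp
      rw [this]
      by_cases hab : a = b <;> simp [hab, ne_comm] <;> omega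

-- A's loop accumulator equals twice the peel count
theorem k_eq (N : List Char) :
    (PySem.List.pyRange 0 (N.length : Int) 1).foldl
      (fun k i => if PySem.List.pyGet? N i ≠ PySem.List.pyGet? N.reverse i then k + 1 else k) (0 : Int)
    = ((2 * misCount N : Nat) : Int) := by
  rw [show (fun (k : Int) i => if PySem.List.pyGet? N i ≠ PySem.List.pyGet? N.reverse i then k + 1 else k)
      = (fun (k : Int) i => if (fun i => decide (PySem.List.pyGet? N i ≠ PySem.List.pyGet? N.reverse i)) i = true then k + 1 else k)
      from by funext k i; simp]
  rw [PySem.List.foldl_count_if, PySem.List.pyRange_zero_natCast, List.countP_map, zero_add]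
  norm_cast
  rw [show ((fun i => decide (PySem.List.pyGet? N i ≠ PySem.List.pyGet? N.reverse i)) ∘ fun (k : Nat) => (k : Int))
      = fun (i : Nat) => decide (N[i]? ≠ N.reverse[i]?) from by
    funext i; simp [Function.comp, PySem.List.pyGet?_natCast]]
  rw [countP_range_zip N N.reverse (by simp), zip_reverse_countP]

-- the two-pointer accumulator splits off
theorem misTP_acc (N : List Char) (i j m : Int) : misTP N i j m = m + misTP N i j 0 := by
  by_cases h : i < j
  · conv_lhs => rw [misTP]
    conv_rhs => rw [misTP]
    rw [if_pos h, if_pos h, misTP_acc N (i+1) (j-1)]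
    conv_rhs => rw [misTP_acc N (i+1) (j-1)]
    split_ifs <;> ring
  · conv_lhs => rw [misTP]
    conv_rhs => rw [misTP]
    rw [if_neg h, if_neg h]; ring
termination_by (j - i).toNat
decreasing_by all_goals omega

-- a window strictly inside a :: M ++ [b] only sees M, shifted by one
theorem misTP_shift (a b : Char) (M : List Char) (i j m : Int) (hi : 0 ≤ i) (hj : j ≤ (M.length : Int) - 1) :
    misTP (a :: (M ++ [b])) (i + 1) (j + 1) m = misTP M i j m := by
  by_cases h : i < j
  · obtain ⟨ki, rfl⟩ : ∃ k : Nat, i = (k : Int) := ⟨i.toNat, by omega⟩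
    obtain ⟨kj, rfl⟩ : ∃ k : Nat, j = (k : Int) := ⟨j.toNat, by omega⟩
    conv_lhs => rw [misTP]
    conv_rhs => rw [misTP]
    rw [if_pos (by omega), if_pos h]
    have hiN : PySem.List.pyGet? (a :: (M ++ [b])) ((ki : Int) + 1) = PySem.List.pyGet? M (ki : Int) := by
      rw [show ((ki : Int) + 1) = ((ki + 1 : Nat) : Int) from by push_cast; ring,
        PySem.List.pyGet?_natCast, PySem.List.pyGet?_natCast, List.getElem?_cons_succ,
        List.getElem?_append_left (by omega : ki < M.length)]
    have hjN : PySem.List.pyGet? (a :: (M ++ [b])) ((kj : Int) + 1) = PySem.List.pyGet? M (kj : Int) := by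
      rw [show ((kj : Int) + 1) = ((kj + 1 : Nat) : Int) from by push_cast; ring,
        PySem.List.pyGet?_natCast, PySem.List.pyGet?_natCast, List.getElem?_cons_succ,
        List.getElem?_append_left (by omega : kj < M.length)]
    rw [hiN, hjN,
      show ((ki : Int) + 1 + 1) = ((ki : Int) + 1) + 1 from by ring,
      show ((kj : Int) + 1 - 1) = ((kj : Int) - 1) + 1 from by ring,
      misTP_shift a b M ((ki : Int) + 1) ((kj : Int) - 1) _ (by omega) (by omega)]
  · conv_lhs => rw [misTP]
    conv_rhs => rw [misTP]
    rw [if_neg (by omega), if_neg h]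
termination_by (j - i).toNat
decreasing_by all_goals omega

-- B's two-pointer loop computes the peel count
theorem misTP_eq (N : List Char) : misTP N 0 ((N.length : Int) - 1) 0 = ((misCount N : Nat) : Int) := by
  induction N using misCount.induct with
  | case1 => rw [misTP]; simp [misCount]
  | case2 a rest ih =>
    rcases eq_or_ne rest [] with rfl | hne
    · rw [misTP]; simp [misCount]
    · obtain ⟨M, b, rfl⟩ : ∃ M b, rest = M ++ [b] :=
        ⟨rest.dropLast, rest.getLast hne, (rest.dropLast_append_getLast hne).symm⟩
      have hM : (M ++ [b]).dropLast = M := by simp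
      rw [hM] at ih
      have hlen : (((a :: (M ++ [b])).length : Int)) - 1 = (M.length : Int) + 1 := by
        simp
      rw [hlen]
      conv_lhs => rw [misTP]
      rw [if_pos (by positivity)]
      have hga : PySem.List.pyGet? (a :: (M ++ [b])) 0 = some a := by
        simpa using PySem.List.pyGet?_natCast (a :: (M ++ [b])) 0
      have hgb : PySem.List.pyGet? (a :: (M ++ [b])) ((M.length : Int) + 1) = some b := by
        rw [show ((M.length : Int) + 1) = ((M.length + 1 : Nat) : Int) from by push_cast; ring,
          PySem.List.pyGet?_natCast]
        simp
      rw [hga, hgb,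
        show (0 : Int) + 1 = 0 + 1 from rfl,
        show ((M.length : Int) + 1 - 1) = ((M.length : Int) - 1) + 1 from by ring,
        misTP_shift a b M 0 ((M.length : Int) - 1) _ (le_refl 0) (by omega),
        misTP_acc, ih, misCount, hM]
      simp only [List.getLastD_concat]
      by_cases hab : a = b <;> simp [hab]

-- ===== VERDICT (by name: the statement is the Claim_ definition above) =====
theorem patched_func_spec : Claim_equal_patched_func := by
  intro s _ hpre
  unfold Spec_patched_func patched_func patched_func_alt
  obtain ⟨N, rest, ht⟩ := List.exists_cons_of_ne_nil hpre
  rw [ht]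
  have hget : PySem.List.pyGet? (N :: rest) (0 : Int) = some N := by
    simpa using PySem.List.pyGet?_natCast (N :: rest) 0
  rw [hget]
  dsimp only
  rw [PySem.List.slice?_none_none_neg_one]
  dsimp only
  rw [k_eq, misTP_eq]
  have hmod : PySem.Int.mod (N.length : Int) 2 = ((N.length % 2 : Nat) : Int) := by
    exact_mod_cast PySem.Int.mod_natCast N.length 2
  rw [hmod]
  rcases Nat.eq_zero_or_pos (misCount N) with h0 | hpos
  · rcases Nat.even_or_odd N.length with he | ho
    · have : N.length % 2 = 0 := Nat.even_iff.mp he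
      simp [h0, this]
    · have : N.length % 2 = 1 := Nat.odd_iff.mp ho
      simp [h0, this]
  · by_cases h1 : misCount N = 1
    · simp [h1]
    · have hne0 : ((2 * misCount N : Nat) : Int) ≠ 0 := by omega
      have hne2 : ((2 * misCount N : Nat) : Int) - 1 ≠ 1 := by omega
      rw [if_neg hne0, if_neg hne2,
        if_neg (show ¬((misCount N : Nat) : Int) = 0 by omega),
        if_neg (show ¬((misCount N : Nat) : Int) = 1 by omega)]
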